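-- pv_equiv track=rewrite | github.com/JasonBallantyne/BinaryEncoding | HammingEncoding.py | checkEncoding
-- ===== SOURCE A (Python) =====
-- def listToString(s):
--     # Initialize an empty string
--     listStr = ""
--
--     # Traverse in the string
--     for ele in s:
--         listStr += ele
--
--     # Return string
--     return listStr
--
-- def checkEncoding(checkNum):
--     numList = []
--     parity = 1
--     y = 0
--     location = 2
--     checkList = list(checkNum)
--
--     while (len(checkList) + y + 1) > 2 ** y:
--         y += 1
--
--     # Assigning placeholder values
--     for i in range(len(checkList)):
--         if i + 1 == parity:
--             checkList.insert(parity - 1, 'y')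
--             parity *= 2
--             numList.append(i)
--
--     for x in numList:
--         codeList = []
--         for p in range(x, len(checkList), location):
--             status = checkList[p:int(p + (location / 2))]
--             for n in status:
--                 codeList.append(n)
--
--         location *= 2
--         # Counting occurance of 1, checking if even and assigning it 1 or 0
--         numCounter = codeList.count('1')
--         if numCounter % 2 == 0:
--             checkList[x] = "0"
--         else:
--             checkList[x] = "1"
--
--     return listToString(checkList)
-- ===== SOURCE B (Python) =====
-- # B: one-pass Hamming encoder: lay the codeword out directly (parity slots at the
-- # power-of-two positions, data in between) and obtain every parity bit at once as
-- # the bits of the XOR of the 1-based positions holding a set bit.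
-- def checkEncoding(checkNum):
--     n = len(checkNum)
--     m = n.bit_length()                               # number of parity bits
--     parity_slots = {(1 << k) - 1 for k in range(m)}  # 0-based parity positions
--     out = []
--     acc = 0
--     data = iter(checkNum)
--     for i in range(n + m):
--         if i in parity_slots:
--             out.append('0')                          # placeholder, filled below
--         else:
--             c = next(data)
--             out.append(c)
--             if c == '1':
--                 acc ^= i + 1
--     for k in range(m):
--         out[(1 << k) - 1] = '1' if (acc >> k) & 1 else '0'
--     return ''.join(out)
-- ===== Notes on version B (the rewrite author's own statement) =====
-- stated objective: faster
-- what changed: Instead of inserting parity placeholders with list.insert and then, for each parity bit, counting set bits over strided slices of the growing list, B lays the codeword out in a single pass (parity slots at the power-of-two positions, data in between) and reads off all parity bits at once as the bits of the XOR of the one-based positions holding a set bit.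
import Mathlib
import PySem

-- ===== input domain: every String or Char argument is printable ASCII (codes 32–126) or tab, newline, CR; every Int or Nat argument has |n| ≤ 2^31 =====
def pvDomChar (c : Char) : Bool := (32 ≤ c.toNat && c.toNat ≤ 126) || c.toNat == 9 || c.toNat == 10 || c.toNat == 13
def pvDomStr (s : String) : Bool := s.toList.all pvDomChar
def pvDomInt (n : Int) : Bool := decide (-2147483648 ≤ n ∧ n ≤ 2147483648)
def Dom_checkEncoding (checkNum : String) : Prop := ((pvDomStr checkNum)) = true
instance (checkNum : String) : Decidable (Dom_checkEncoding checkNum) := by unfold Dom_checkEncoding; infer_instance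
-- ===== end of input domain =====

-- ===== PORT A =====
-- header: B replaces A's insert-placeholders-then-count-strided-slices encoder by a single
-- pass that XORs the one-based positions of the set data bits (objective: faster, measured).
theorem pvTwoMulLePow : ∀ y : Nat, 2 * y ≤ 2 ^ y
  | 0 => by simp
  | 1 => by norm_num
  | (y+2) => by
      have ih := pvTwoMulLePow (y+1)
      have h2 : 2 ≤ 2 ^ (y+1) := by
        calc 2 = 2 ^ 1 := by norm_num
        _ ≤ 2 ^ (y+1) := Nat.pow_le_pow_right (by norm_num) (by omega)
      have : 2 ^ (y+2) = 2 ^ (y+1) + 2 ^ (y+1) := by ring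
      omega

-- A's first while-loop (computes y, which A never uses; ported faithfully)
def pvAYLoop (len y : Nat) : Nat :=
  if _h : len + y + 1 > 2 ^ y then pvAYLoop len (y + 1) else y
termination_by len + 1 - y
decreasing_by
  have h2 := pvTwoMulLePow y
  omega

def listToString (s : List Char) : String :=
  s.foldl (fun listStr ele => listStr.push ele) ""

-- body of A's placeholder-insertion loop (state: (checkList, parity, numList))
def pvAStep1 (st : List Char × Nat × List Nat) (i : Nat) : List Char × Nat × List Nat :=
  if i + 1 = st.2.1 then
    (PySem.List.insert st.1 ((st.2.1 - 1 : Nat) : Int) 'y', st.2.1 * 2, st.2.2 ++ [i])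
  else st

-- body of A's parity loop (state: (checkList, location))
def pvAStep2 (st : List Char × Nat) (x : Nat) : List Char × Nat :=
  let codeList : List Char :=
    (PySem.List.pyRange (x : Int) (PySem.List.len st.1) ((st.2 : Nat) : Int)).foldl
      (fun codeList p =>
        -- status = checkList[p:int(p + location/2)]; location is always even (2*2^k),
        -- so the float arithmetic int(p + location/2) is exactly p + location/2
        let status := PySem.List.slice st.1 (some p) (some (p + ((st.2 / 2 : Nat) : Int)))
        codeList ++ status)
      []
  let numCounter := PySem.List.count codeList '1'
  if numCounter % 2 = 0 then
    (PySem.List.pySetD st.1 (x : Int) '0', st.2 * 2)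
  else
    (PySem.List.pySetD st.1 (x : Int) '1', st.2 * 2)

def checkEncoding (checkNum : String) : String :=
  let numList : List Nat := []
  let parity : Nat := 1
  let y : Nat := 0
  let location : Nat := 2
  let checkList : List Char := checkNum.toList
  let _y := pvAYLoop checkList.length y   -- dead code in A: y is never read after this loop
  -- for i in range(len(checkList)) (the range is computed from the ORIGINAL length): state (checkList, parity, numList)
  let st1 := (List.range checkList.length).foldl pvAStep1 (checkList, parity, numList)
  -- for x in numList: state (checkList, location)
  let st2 := st1.2.2.foldl pvAStep2 (st1.1, location)
  listToString st2.1

-- ===== PORT B =====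
-- body of B's single pass (state: (out, acc, di); 'next(data)' on the string iterator is
-- tracked as the index di of the next data character, which is exactly its effect here)
def pvBStep (checkNum : String) (slots : PySem.Set Nat) (st : List Char × Nat × Nat) (i : Nat) :
    List Char × Nat × Nat :=
  if slots.contains i then
    (st.1 ++ ['0'], st.2.1, st.2.2)
  else
    let c := checkNum.toList.getD st.2.2 ' '   -- next(data); di < n always holds here, so getD is exact
    (st.1 ++ [c], (if c = '1' then st.2.1 ^^^ (i + 1) else st.2.1), st.2.2 + 1)

-- body of B's parity fill loop
def pvBFill (acc : Nat) (out : List Char) (k : Nat) : List Char :=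
  out.set ((1 <<< k) - 1) (if (acc >>> k) &&& 1 = 1 then '1' else '0')

def checkEncoding_alt (checkNum : String) : String :=
  let n := checkNum.toList.length
  let m := PySem.Int.bitLength (n : Int)          -- n.bit_length()
  let slots : PySem.Set Nat :=
    PySem.Set.ofList ((List.range m).map (fun k => (1 <<< k) - 1))
  -- one pass over the codeword positions: state (out, acc, di)
  let st := (List.range (n + m)).foldl (pvBStep checkNum slots) (([] : List Char), 0, 0)
  let out := (List.range m).foldl (pvBFill st.2.1) st.1
  String.ofList out

-- ===== PRECONDITION & SPEC =====
def Spec_checkEncoding (checkNum : String) (out : String) : Prop := out = checkEncoding_alt checkNum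
instance (checkNum : String) (out : String) : Decidable (Spec_checkEncoding checkNum out) := by unfold Spec_checkEncoding; infer_instance

-- ===== CLAIM (what is proved, stated in full; the proofs are below) =====
def Claim_equal_checkEncoding : Prop := ∀ (checkNum : String), Dom_checkEncoding checkNum → Spec_checkEncoding checkNum (checkEncoding checkNum)

-- ===== LEMMAS AND PROOFS =====

/- `pvC j` = number of powers of two ≤ j (the exponent of the smallest power of two > j). -/
def pvC : Nat → Nat
  | 0 => 0
  | j+1 => if j + 1 = 2 ^ pvC j then pvC j + 1 else pvC j

theorem pvC_spec : ∀ j : Nat, j < 2 ^ pvC j ∧ ∀ k, (k < pvC j ↔ 2 ^ k ≤ j) := by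
  intro j
  induction j with
  | zero =>
    refine ⟨by simp [pvC], fun k => ?_⟩
    have := Nat.two_pow_pos k
    simp only [pvC]
    omega
  | succ j ih =>
    obtain ⟨h1, h2⟩ := ih
    have e : pvC (j+1) = if j + 1 = 2 ^ pvC j then pvC j + 1 else pvC j := rfl
    by_cases hc : j + 1 = 2 ^ pvC j
    · rw [e, if_pos hc]
      refine ⟨by rw [pow_succ]; omega, fun k => ?_⟩
      constructor
      · intro hk
        rcases Nat.lt_succ_iff_lt_or_eq.mp hk with h | h
        · have := (h2 k).mp h; omega
        · subst h; omega
      · intro hk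
        by_contra hnk
        push_neg at hnk
        have : 2 ^ (pvC j + 1) ≤ 2 ^ k := Nat.pow_le_pow_right (by norm_num) hnk
        rw [pow_succ] at this; omega
    · rw [e, if_neg hc]
      refine ⟨by omega, fun k => ?_⟩
      rw [h2 k]
      constructor
      · omega
      · intro hk
        rcases Nat.lt_or_ge k (pvC j) with h | h
        · exact (h2 k).mp h
        · have : 2 ^ pvC j ≤ 2 ^ k := Nat.pow_le_pow_right (by norm_num) h
          omega

theorem pvC_lt_iff (j k : Nat) : k < pvC j ↔ 2 ^ k ≤ j := (pvC_spec j).2 k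


theorem pvC_pow (k : Nat) : pvC (2 ^ k - 1) = k := by
  cases k with
  | zero => rfl
  | succ k =>
    have hub : ¬ (k + 1 < pvC (2 ^ (k+1) - 1)) := by
      intro h
      have := (pvC_lt_iff (2 ^ (k+1) - 1) (k+1)).mp h
      have := Nat.two_pow_pos (k+1)
      omega
    have hlb : k < pvC (2 ^ (k+1) - 1) := by
      apply (pvC_lt_iff _ k).mpr
      have h : (2:Nat) ^ (k+1) = 2 * 2 ^ k := by ring
      have := Nat.two_pow_pos k
      omega
    omega

theorem pvC_le_self (j : Nat) : pvC j ≤ j := by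
  rcases Nat.eq_zero_or_pos (pvC j) with h | h
  · omega
  · have h1 : pvC j - 1 < pvC j := by omega
    have h2 := (pvC_lt_iff j (pvC j - 1)).mp h1
    have h3 : pvC j - 1 < 2 ^ (pvC j - 1) := Nat.lt_two_pow_self
    omega

/- n.bit_length() is exactly pvC n -/
theorem pvBitLength_eq (n : Nat) : PySem.Int.bitLength ((n : Nat) : Int) = pvC n := by
  rcases Nat.eq_zero_or_pos n with h0 | h0
  · subst h0; rfl
  · set B := PySem.Int.bitLength ((n : Nat) : Int) with hB
    have hlt : n < 2 ^ B := by
      have := PySem.Int.lt_two_pow_bitLength ((n : Nat) : Int)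
      simpa using this
    have hle : 2 ^ (B - 1) ≤ n := by
      have := PySem.Int.two_pow_bitLength_le ((n : Nat) : Int) (by exact_mod_cast (by omega : n ≠ 0))
      simpa using this
    have hB0 : 0 < B := by
      by_contra h
      have : B = 0 := by omega
      rw [this] at hlt
      simp at hlt
      omega
    have h1 : B - 1 < pvC n := (pvC_lt_iff n (B - 1)).mpr hle
    have h3 : pvC n ≤ B := by
      by_contra hcon
      have : 2 ^ B ≤ n := (pvC_lt_iff n B).mp (by omega)
      omega
    omega

/- ---- the common model of the codeword ---- -/

/- position q (0-based) of the codeword is a parity slot -/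
abbrev pvPar (n q : Nat) : Prop := q + 1 = 2 ^ pvC q ∧ q + 1 ≤ n

theorem pvPar_C_lt (n q : Nat) (h : pvPar n q) : pvC q < pvC n :=
  (pvC_lt_iff n (pvC q)).mpr (by have h1 := h.1; have h2 := h.2; omega)

theorem pvSlots_mem (n i : Nat) :
    (PySem.Set.contains
        (PySem.Set.ofList ((List.range (pvC n)).map (fun k => (1 <<< k) - 1))) i) = true
      ↔ pvPar n i := by
  rw [PySem.Set.contains_iff, PySem.Set.mem_ofList, List.mem_map]
  constructor
  · rintro ⟨k, hk, hik⟩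
    rw [List.mem_range] at hk
    rw [Nat.shiftLeft_eq, one_mul] at hik
    have hpos := Nat.two_pow_pos k
    have hi : i = 2 ^ k - 1 := hik.symm
    subst hi
    have hc : pvC (2 ^ k - 1) = k := pvC_pow k
    refine ⟨by rw [hc]; omega, ?_⟩
    have := (pvC_lt_iff n k).mp hk
    omega
  · rintro ⟨h1, h2⟩
    refine ⟨pvC i, ?_, ?_⟩
    · rw [List.mem_range]
      exact pvPar_C_lt n i ⟨h1, h2⟩
    · rw [Nat.shiftLeft_eq, one_mul]
      omega

/- the data character at codeword position q -/
def pvDch (cs : List Char) (q : Nat) : Char := cs.getD (q - min (pvC q) (pvC cs.length)) ' '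

/- positions counted by parity bit k -/
def pvPred (cs : List Char) (k q : Nat) : Bool :=
  decide (¬ pvPar cs.length q ∧ pvDch cs q = '1') && Nat.testBit (q + 1) k

def pvCnt (cs : List Char) (k : Nat) : Nat :=
  (List.range (cs.length + pvC cs.length)).countP (pvPred cs k)

def pvBitc (cs : List Char) (k : Nat) : Char := if pvCnt cs k % 2 = 1 then '1' else '0'

/- the codeword after the first t parity bits have been resolved; ph = the placeholder
   character of unresolved parity slots (A uses 'y', B uses '0') -/
def pvF (ph : Char) (cs : List Char) (t : Nat) : List Char :=
  (List.range (cs.length + pvC cs.length)).map (fun i =>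
    if pvPar cs.length i then (if pvC i < t then pvBitc cs (pvC i) else ph) else pvDch cs i)

theorem pvF_length (ph : Char) (cs : List Char) (t : Nat) :
    (pvF ph cs t).length = cs.length + pvC cs.length := by
  simp [pvF]

/- at t = pvC cs.length no parity slot is unresolved: the placeholder is irrelevant -/
theorem pvF_full (ph ph' : Char) (cs : List Char) :
    pvF ph cs (pvC cs.length) = pvF ph' cs (pvC cs.length) := by
  rw [pvF, pvF]
  apply List.map_congr_left
  intro i _
  by_cases hp : pvPar cs.length i
  · rw [if_pos hp, if_pos hp, if_pos (pvPar_C_lt _ _ hp), if_pos (pvPar_C_lt _ _ hp)]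
  · rw [if_neg hp, if_neg hp]

/- ---- bit lemmas ---- -/

theorem pvTestBit_hi (k c u : Nat) (h1 : 2 ^ k ≤ u) (h2 : u < 2 ^ (k+1)) :
    Nat.testBit (c * 2 ^ (k+1) + u) k = true := by
  rw [Nat.testBit_eq_decide_div_mod_eq]
  have e : c * 2 ^ (k+1) + u = u + 2 ^ k * (2 * c) := by ring
  rw [e, Nat.add_mul_div_left _ _ (Nat.two_pow_pos k)]
  have hu : u / 2 ^ k = 1 := by
    apply Nat.div_eq_of_lt_le
    · omega
    · rw [pow_succ] at h2; omega
  rw [hu]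
  simp [Nat.add_mul_mod_self_left]

theorem pvTestBit_lo (k c u : Nat) (h2 : u < 2 ^ k) :
    Nat.testBit (c * 2 ^ (k+1) + u) k = false := by
  rw [Nat.testBit_eq_decide_div_mod_eq]
  have e : c * 2 ^ (k+1) + u = u + 2 ^ k * (2 * c) := by ring
  rw [e, Nat.add_mul_div_left _ _ (Nat.two_pow_pos k)]
  rw [Nat.div_eq_of_lt h2]
  simp [Nat.add_mul_mod_self_left]

/- ---- A side: the insertion loop builds the placeholder layout ---- -/

/- the placeholder layout after c insertions -/
def pvMix (cs : List Char) : Nat → List Char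
  | 0 => cs
  | c+1 => (pvMix cs c).take (2 ^ c - 1) ++ 'y' :: (pvMix cs c).drop (2 ^ c - 1)

theorem pvMix_length (cs : List Char) (c : Nat) : (pvMix cs c).length = cs.length + c := by
  induction c with
  | zero => rfl
  | succ c ih =>
    show ((pvMix cs c).take (2 ^ c - 1) ++ 'y' :: (pvMix cs c).drop (2 ^ c - 1)).length = _
    simp [List.length_take, List.length_drop, ih]
    omega

theorem pvMix_get (cs : List Char) (c : Nat) (hc : c ≤ pvC cs.length) :
    ∀ i, i < cs.length + c →
      (pvMix cs c).getD i ' ' =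
        (if i + 1 = 2 ^ pvC i ∧ pvC i < c then 'y' else cs.getD (i - min (pvC i) c) ' ') := by
  induction c with
  | zero =>
    intro i hi
    rw [if_neg (by omega)]
    simp [pvMix]
  | succ c ih =>
    intro i hi
    have hc' : c ≤ pvC cs.length := by omega
    have hcn : 2 ^ c ≤ cs.length := (pvC_lt_iff _ c).mp (by omega)
    have hlen := pvMix_length cs c
    have hpos := Nat.two_pow_pos c
    have hcl : c < 2 ^ c := Nat.lt_two_pow_self
    show ((pvMix cs c).take (2 ^ c - 1) ++ 'y' :: (pvMix cs c).drop (2 ^ c - 1)).getD i ' ' = _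
    have htl : ((pvMix cs c).take (2 ^ c - 1)).length = 2 ^ c - 1 := by
      simp [hlen]; omega
    rcases Nat.lt_trichotomy i (2 ^ c - 1) with h | h | h
    · -- left of the insertion point
      rw [List.getD_eq_getElem?_getD, List.getElem?_append_left (by omega),
          List.getElem?_take, if_pos h, ← List.getD_eq_getElem?_getD]
      rw [ih hc' i (by omega)]
      have hCi : pvC i ≤ c := by
        by_contra hcon
        have := (pvC_lt_iff i c).mp (by omega)
        omega
      by_cases hcond : i + 1 = 2 ^ pvC i ∧ pvC i < c
      · rw [if_pos hcond, if_pos ⟨hcond.1, by omega⟩]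
      · have hcond2 : ¬ (i + 1 = 2 ^ pvC i ∧ pvC i < c + 1) := by
          rintro ⟨he, hl⟩
          apply hcond
          refine ⟨he, ?_⟩
          rcases Nat.lt_or_ge (pvC i) c with h' | h'
          · exact h'
          · have : pvC i = c := by omega
            rw [this] at he
            omega
        rw [if_neg hcond, if_neg hcond2]
        have : min (pvC i) (c + 1) = min (pvC i) c := by omega
        rw [this]
    · -- the inserted 'y'
      subst h
      rw [List.getD_eq_getElem?_getD, List.getElem?_append_right (by omega), htl]
      simp only [Nat.sub_self, List.getElem?_cons_zero, Option.getD_some]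
      have hpc : pvC (2 ^ c - 1) = c := pvC_pow c
      have hpos' := Nat.two_pow_pos c
      rw [if_pos ⟨by rw [hpc]; omega, by rw [hpc]; omega⟩]
    · -- right of the insertion point: shifted by one
      rw [List.getD_eq_getElem?_getD, List.getElem?_append_right (by omega), htl]
      have e : i - (2 ^ c - 1) = (i - 2 ^ c) + 1 := by omega
      rw [e]
      simp only [List.getElem?_cons_succ, List.getElem?_drop]
      have e2 : 2 ^ c - 1 + (i - 2 ^ c) = i - 1 := by omega
      rw [e2, ← List.getD_eq_getElem?_getD]
      rw [ih hc' (i - 1) (by omega)]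
      have hCi : c < pvC i := (pvC_lt_iff i c).mpr (by omega)
      have hCi1 : c ≤ pvC (i - 1) := by
        rcases Nat.eq_zero_or_pos c with hc0 | hc0
        · omega
        · have h2 : 2 ^ (c - 1) ≤ i - 1 := by
            have : 2 ^ c = 2 * 2 ^ (c - 1) := by
              rw [← pow_succ']
              congr 1
              omega
            omega
          have := (pvC_lt_iff (i - 1) (c - 1)).mpr h2
          omega
      have hnc1 : ¬ (i + 1 = 2 ^ pvC i ∧ pvC i < c + 1) := by
        rintro ⟨he, hl⟩
        have : 2 ^ pvC i ≤ 2 ^ c := Nat.pow_le_pow_right (by norm_num) (by omega)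
        omega
      have hnc2 : ¬ ((i - 1) + 1 = 2 ^ pvC (i - 1) ∧ pvC (i - 1) < c) := by
        rintro ⟨he, hl⟩
        have h2 : 2 ^ pvC (i - 1) ≤ 2 ^ (c - 1) := Nat.pow_le_pow_right (by norm_num) (by omega)
        have h3 : 2 ^ c = 2 * 2 ^ (c - 1) := by
          rw [← pow_succ']
          congr 1
          omega
        omega
      rw [if_neg hnc1, if_neg hnc2]
      have e3 : i - min (pvC i) (c + 1) = (i - 1) - min (pvC (i - 1)) c := by omega
      rw [e3]

theorem pvAloop (cs : List Char) : ∀ j, j ≤ cs.length →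
    (List.range j).foldl pvAStep1 (cs, 1, ([] : List Nat)) =
      (pvMix cs (pvC j), 2 ^ pvC j, (List.range (pvC j)).map (fun k => 2 ^ k - 1)) := by
  intro j
  induction j with
  | zero => intro _; rfl
  | succ j ih =>
    intro hj
    rw [List.range_succ, List.foldl_append, ih (by omega), List.foldl_cons, List.foldl_nil]
    have e : pvC (j+1) = if j + 1 = 2 ^ pvC j then pvC j + 1 else pvC j := rfl
    by_cases hc : j + 1 = 2 ^ pvC j
    · rw [e, if_pos hc]
      show pvAStep1 _ j = _
      rw [pvAStep1]
      simp only []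
      rw [if_pos (by exact hc)]
      have hins : PySem.List.insert (pvMix cs (pvC j)) ((2 ^ pvC j - 1 : Nat) : Int) 'y'
          = pvMix cs (pvC j + 1) := by
        rw [PySem.List.insert_natCast _ _ _ (by rw [pvMix_length]; omega)]
        rfl
      rw [hins]
      refine congrArg₂ _ rfl (congrArg₂ _ (by rw [pow_succ]) ?_)
      rw [List.range_succ, List.map_append]
      simp only [List.map_cons, List.map_nil]
      congr 2
      omega
    · rw [e, if_neg hc]
      show pvAStep1 _ j = _
      rw [pvAStep1]
      simp only []
      rw [if_neg (by exact hc)]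

theorem pvSetMap {α : Type} (L p : Nat) (g : Nat → α) (v : α) (hp : p < L) :
    ((List.range L).map g).set p v = (List.range L).map (fun i => if i = p then v else g i) := by
  apply List.ext_getElem
  · simp
  · intro i h1 h2
    simp only [List.getElem_set, List.getElem_map, List.getElem_range]
    simp only [List.length_set, List.length_map, List.length_range] at h1
    by_cases h : i = p
    · simp [h]
    · have h' : ¬ p = i := fun hh => h hh.symm
      simp [h, h']

theorem pvF_getD (ph : Char) (cs : List Char) (t q : Nat) (h : q < cs.length + pvC cs.length) :
    (pvF ph cs t).getD q ' ' =
      (if pvPar cs.length q then (if pvC q < t then pvBitc cs (pvC q) else ph) else pvDch cs q) := by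
  rw [pvF, List.getD_eq_getElem?_getD]
  rw [List.getElem?_map, List.getElem?_range (by omega)]
  rfl

/- the layout equals the model with no parity bit resolved -/
theorem pvMix_eq_F0 (cs : List Char) : pvMix cs (pvC cs.length) = pvF 'y' cs 0 := by
  apply List.ext_getElem
  · rw [pvMix_length, pvF_length]
  · intro i h1 h2
    rw [pvMix_length] at h1
    rw [← List.getD_eq_getElem _ ' ' h2, ← List.getD_eq_getElem _ ' ' (by rw [pvMix_length]; exact h1)]
    rw [pvMix_get cs (pvC cs.length) (le_refl _) i h1, pvF_getD 'y' cs 0 i h1]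
    have hiff : (i + 1 = 2 ^ pvC i ∧ pvC i < pvC cs.length) ↔ pvPar cs.length i := by
      unfold pvPar
      constructor
      · rintro ⟨h, hl⟩
        exact ⟨h, by have := (pvC_lt_iff cs.length (pvC i)).mp hl; omega⟩
      · rintro ⟨h, hl⟩
        exact ⟨h, (pvC_lt_iff cs.length (pvC i)).mpr (by omega)⟩
    by_cases hp : i + 1 = 2 ^ pvC i ∧ pvC i < pvC cs.length
    · rw [if_pos hp, if_pos (hiff.mp hp), if_neg (by omega)]
    · rw [if_neg hp, if_neg (fun hh => hp (hiff.mpr hh))]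
      rfl

/- writing parity bit t into the model advances it one step -/
theorem pvF_step (ph : Char) (cs : List Char) (t : Nat) (ht : t < pvC cs.length) (ch : Char)
    (hch : ch = pvBitc cs t) :
    (pvF ph cs t).set (2 ^ t - 1) ch = pvF ph cs (t + 1) := by
  have htn : 2 ^ t ≤ cs.length := (pvC_lt_iff _ t).mp ht
  have hpos := Nat.two_pow_pos t
  rw [pvF, pvF, pvSetMap _ _ _ _ (by omega)]
  apply List.map_congr_left
  intro i hi
  rw [List.mem_range] at hi
  by_cases he : i = 2 ^ t - 1
  · subst he
    rw [if_pos rfl]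
    have hpc : pvC (2 ^ t - 1) = t := pvC_pow t
    rw [if_pos ⟨by rw [hpc]; omega, by omega⟩, hpc, if_pos (by omega), hch]
  · rw [if_neg he]
    by_cases hp : pvPar cs.length i
    · rw [if_pos hp, if_pos hp]
      have hne : pvC i ≠ t := by
        intro hh
        apply he
        have := hp.1
        rw [hh] at this
        omega
      by_cases hl : pvC i < t
      · rw [if_pos hl, if_pos (by omega)]
      · rw [if_neg hl, if_neg (by omega)]
    · rw [if_neg hp, if_neg hp]

/- ---- slices to index counting ---- -/

theorem pvSliceMap (L : List Char) (x w : Nat) :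
    (L.drop x).take w = (List.range' x (min w (L.length - x))).map (fun q => L.getD q ' ') := by
  induction w generalizing x with
  | zero => simp
  | succ w ih =>
    rcases Nat.lt_or_ge x L.length with h | h
    · rw [List.drop_eq_getElem_cons h]
      have e : min (w + 1) (L.length - x) = (min w (L.length - (x+1))) + 1 := by omega
      rw [e, List.range'_succ, List.take_succ_cons, List.map_cons, ih (x+1)]
      rw [List.getD_eq_getElem L ' ' h]
    · rw [List.drop_eq_nil_of_le h]
      have e : min (w + 1) (L.length - x) = 0 := by omega
      rw [e]
      simp

theorem pvPyRange_nil (a b s : Nat) (hs : 0 < s) (h : b ≤ a) :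
    PySem.List.pyRange (a : Int) (b : Int) (s : Int) = [] := by
  rw [PySem.List.pyRange_of_pos _ _ (by exact_mod_cast hs)]
  have hab : ¬ ((a : Int) < (b : Int)) := by exact_mod_cast Nat.not_lt.mpr h
  rw [if_neg hab]
  simp

theorem pvToNatDiv (x s : Nat) : (((x : Int) ) / ((s : Int))).toNat = x / s := by
  rw [← Int.natCast_div]
  exact Int.toNat_natCast _

theorem pvPyRange_cons (a b s : Nat) (hs : 0 < s) (h : a < b) :
    PySem.List.pyRange (a : Int) (b : Int) (s : Int) =
      (a : Int) :: PySem.List.pyRange ((a + s : Nat) : Int) (b : Int) (s : Int) := by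
  have hs' : (0 : Int) < (s : Int) := by exact_mod_cast hs
  rw [PySem.List.pyRange_of_pos _ _ hs', PySem.List.pyRange_of_pos _ _ hs']
  have hab : ((a : Int) < (b : Int)) := by exact_mod_cast h
  rw [if_pos hab]
  have ecast : ((b : Int) - a + s - 1) = ((b - a + s - 1 : Nat) : Int) := by push_cast; omega
  have e1 : (((b : Int) - a + s - 1) / s).toNat = (b - a + s - 1) / s := by
    rw [ecast]; exact pvToNatDiv _ _
  rw [e1]
  rcases Nat.lt_or_ge a (b - s) with hbig | hsmall
  · -- a + s < b : one more full stride
    have hab2 : ((a + s : Nat) : Int) < (b : Int) := by exact_mod_cast (by omega : a + s < b)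
    rw [if_pos hab2]
    have ecast2 : ((b : Int) - ((a + s : Nat) : Int) + s - 1) = ((b - (a + s) + s - 1 : Nat) : Int) := by
      push_cast; omega
    have e2 : (((b : Int) - ((a + s : Nat) : Int) + s - 1) / s).toNat = (b - (a + s) + s - 1) / s := by
      rw [ecast2]; exact pvToNatDiv _ _
    rw [e2]
    have estep : b - a + s - 1 = (b - (a + s) + s - 1) + s := by omega
    rw [estep, Nat.add_div_right _ hs]
    rw [List.range_succ_eq_map, List.map_cons, List.map_map]
    refine congrArg₂ _ (by simp) ?_
    apply List.map_congr_left
    intro t _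
    show (a : Int) + s * ((t + 1 : Nat) : Int) = ((a + s : Nat) : Int) + s * (t : Nat)
    push_cast; ring
  · -- b ≤ a + s : exactly one stride left
    have hcnt : (b - a + s - 1) / s = 1 := by
      apply Nat.div_eq_of_lt_le <;> omega
    rw [hcnt]
    have hab2 : ¬ (((a + s : Nat) : Int) < (b : Int)) := by
      exact_mod_cast Nat.not_lt.mpr (by omega : b ≤ a + s)
    rw [if_neg hab2]
    simp

theorem pvRangeSplit (a r1 r2 : Nat) :
    List.range' a (r1 + r2) = List.range' a r1 ++ List.range' (a + r1) r2 := by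
  have h := @List.range'_append a r1 r2 1
  simpa using h.symm

theorem pvSliceCount (L : List Char) (x w : Nat) :
    ((L.drop x).take w).count '1'
      = (List.range' x (min w (L.length - x))).countP (fun q => decide (L.getD q ' ' = '1')) := by
  rw [pvSliceMap]
  rw [List.count_eq_countP, List.countP_map]
  apply List.countP_congr
  intro q _
  simp

theorem pvST (L : List Char) (k : Nat) :
    ∀ d c, L.length - (2 ^ k - 1 + c * 2 ^ (k+1)) ≤ d →
      ((PySem.List.pyRange ((2 ^ k - 1 + c * 2 ^ (k+1) : Nat) : Int) (L.length : Int) ((2 ^ (k+1) : Nat) : Int)).flatMap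
          (fun p => PySem.List.slice L (some p) (some (p + ((2 ^ k : Nat) : Int))))).count '1'
        = (List.range' (2 ^ k - 1 + c * 2 ^ (k+1)) (L.length - (2 ^ k - 1 + c * 2 ^ (k+1)))).countP
            (fun q => Nat.testBit (q + 1) k && decide (L.getD q ' ' = '1')) := by
  have hposk := Nat.two_pow_pos k
  have hposs := Nat.two_pow_pos (k+1)
  have hpow : (2:Nat) ^ (k+1) = 2 ^ k + 2 ^ k := by rw [pow_succ]; omega
  intro d
  induction d with
  | zero =>
    intro c hc
    rw [pvPyRange_nil _ _ _ hposs (by omega)]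
    have h0 : L.length - (2 ^ k - 1 + c * 2 ^ (k+1)) = 0 := by omega
    rw [h0]
    simp
  | succ d ih =>
    intro c hc
    have hcs : (c + 1) * 2 ^ (k+1) = c * 2 ^ (k+1) + 2 ^ (k+1) := by ring
    set x := 2 ^ k - 1 + c * 2 ^ (k+1) with hx
    have seg_hi : ∀ r, r ≤ 2 ^ k →
        (List.range' x r).countP (fun q => Nat.testBit (q + 1) k && decide (L.getD q ' ' = '1'))
          = (List.range' x r).countP (fun q => decide (L.getD q ' ' = '1')) := by
      intro r hr
      apply List.countP_congr
      intro q hq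
      rw [List.mem_range'_1] at hq
      have hq1 : q + 1 = c * 2 ^ (k+1) + (q + 1 - c * 2 ^ (k+1)) := by omega
      have hb : Nat.testBit (q + 1) k = true := by
        rw [hq1]
        exact pvTestBit_hi k c _ (by omega) (by omega)
      simp [hb]
    have seg_lo : ∀ r, r ≤ 2 ^ k →
        (List.range' (x + 2 ^ k) r).countP (fun q => Nat.testBit (q + 1) k && decide (L.getD q ' ' = '1'))
          = 0 := by
      intro r hr
      rw [List.countP_eq_zero]
      intro q hq
      rw [List.mem_range'_1] at hq
      have hq1 : q + 1 = (c + 1) * 2 ^ (k+1) + (q + 1 - (c + 1) * 2 ^ (k+1)) := by omega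
      have hb : Nat.testBit (q + 1) k = false := by
        rw [hq1]
        exact pvTestBit_lo k (c+1) _ (by omega)
      simp [hb]
    rcases Nat.lt_or_ge x L.length with hlt | hge
    · rw [pvPyRange_cons _ _ _ hposs hlt, List.flatMap_cons, List.count_append]
      rw [PySem.List.slice_natCast_add, pvSliceCount]
      have hx1 : 2 ^ k - 1 + (c + 1) * 2 ^ (k+1) = x + 2 ^ (k+1) := by omega
      have ihc := ih (c + 1) (by omega)
      rw [hx1] at ihc
      rw [ihc]
      rcases Nat.lt_or_ge L.length (x + 2 ^ (k+1)) with hsmall | hbig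
      · -- last (partial) block
        have hnil : PySem.List.pyRange ((x + 2 ^ (k+1) : Nat) : Int) (L.length : Int) ((2 ^ (k+1) : Nat) : Int) = [] :=
          pvPyRange_nil _ _ _ hposs (by omega)
        have hz : L.length - (x + 2 ^ (k+1)) = 0 := by omega
        rw [hz]
        simp only [List.range'_zero, List.countP_nil, Nat.add_zero]
        rcases Nat.lt_or_ge (2 ^ k) (L.length - x) with hc1 | hc1
        · have hmin : min (2 ^ k) (L.length - x) = 2 ^ k := by omega
          rw [hmin]
          have hsplit : L.length - x = 2 ^ k + (L.length - x - 2 ^ k) := by omega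
          rw [hsplit, pvRangeSplit, List.countP_append, seg_hi _ (le_refl _),
              seg_lo _ (by omega)]
          omega
        · have hmin : min (2 ^ k) (L.length - x) = L.length - x := by omega
          rw [hmin, seg_hi _ (by omega)]
      · -- at least one full block remains
        have hmin : min (2 ^ k) (L.length - x) = 2 ^ k := by omega
        rw [hmin]
        have hsplit : L.length - x = 2 ^ (k+1) + (L.length - (x + 2 ^ (k+1))) := by omega
        rw [hsplit, pvRangeSplit, List.countP_append]
        have hsplit2 : List.range' x (2 ^ (k+1)) = List.range' x (2 ^ k) ++ List.range' (x + 2 ^ k) (2 ^ k) := by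
          rw [hpow, pvRangeSplit]
        rw [hsplit2, List.countP_append, seg_hi _ (le_refl _), seg_lo _ (le_refl _)]
        omega
    · rw [pvPyRange_nil _ _ _ hposs (by omega)]
      have h0 : L.length - x = 0 := by omega
      rw [h0]
      simp

/- the strided-slice count of a parity pass equals a one-predicate count over all positions -/
theorem pvStride (L : List Char) (k : Nat) :
    ((PySem.List.pyRange ((2 ^ k - 1 : Nat) : Int) (PySem.List.len L) ((2 ^ (k+1) : Nat) : Int)).foldl
        (fun codeList p => codeList ++ PySem.List.slice L (some p) (some (p + ((2 ^ (k+1) / 2 : Nat) : Int)))) []).count '1'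
      = (List.range L.length).countP (fun q => Nat.testBit (q + 1) k && decide (L.getD q ' ' = '1')) := by
  have hposk := Nat.two_pow_pos k
  rw [PySem.List.len_eq, PySem.List.foldl_append_eq_flatMap, List.nil_append]
  have hw2 : 2 ^ (k+1) / 2 = 2 ^ k := by
    rw [pow_succ, Nat.mul_div_cancel _ (by norm_num)]
  rw [hw2]
  have hst := pvST L k L.length 0 (by omega)
  have hx0 : 2 ^ k - 1 + 0 * 2 ^ (k+1) = 2 ^ k - 1 := by omega
  rw [hx0] at hst
  rw [hst, List.range_eq_range']
  have hlow : ∀ r a, a + r ≤ 2 ^ k - 1 →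
      (List.range' a r).countP (fun q => Nat.testBit (q + 1) k && decide (L.getD q ' ' = '1')) = 0 := by
    intro r a ha
    rw [List.countP_eq_zero]
    intro q hq
    rw [List.mem_range'_1] at hq
    have hb : Nat.testBit (q + 1) k = false := by
      have := pvTestBit_lo k 0 (q + 1) (by omega)
      simpa using this
    simp [hb]
  rcases Nat.lt_or_ge L.length (2 ^ k - 1) with hsm | hbg
  · have h0 : L.length - (2 ^ k - 1) = 0 := by omega
    rw [h0]
    simp only [List.range'_zero, List.countP_nil]
    exact (hlow L.length 0 (by omega)).symm
  · have hsplit : List.range' 0 L.length =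
        List.range' 0 (2 ^ k - 1) ++ List.range' (2 ^ k - 1) (L.length - (2 ^ k - 1)) := by
      have h := pvRangeSplit 0 (2 ^ k - 1) (L.length - (2 ^ k - 1))
      rw [Nat.zero_add] at h
      rw [← h]
      congr 1
      omega
    rw [hsplit, List.countP_append, hlow (2 ^ k - 1) 0 (by omega), Nat.zero_add]

/- ---- A side: the parity loop computes pvF ---- -/

theorem pvAloop2 (cs : List Char) : ∀ t, t ≤ pvC cs.length →
    ((List.range t).map (fun k => 2 ^ k - 1)).foldl pvAStep2 (pvF 'y' cs 0, 2) = (pvF 'y' cs t, 2 ^ (t+1)) := by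
  intro t
  induction t with
  | zero => intro _; rfl
  | succ t ih =>
    intro ht
    rw [List.range_succ, List.map_append, List.foldl_append, ih (by omega)]
    simp only [List.map_cons, List.map_nil, List.foldl_cons, List.foldl_nil]
    have htm : t < pvC cs.length := by omega
    have htn : 2 ^ t ≤ cs.length := (pvC_lt_iff _ t).mp htm
    have hpos := Nat.two_pow_pos t
    simp only [pvAStep2]
    rw [PySem.List.count_eq, pvStride (pvF 'y' cs t) t, pvF_length]
    have hcount : (List.range (cs.length + pvC cs.length)).countP
        (fun q => Nat.testBit (q + 1) t && decide ((pvF 'y' cs t).getD q ' ' = '1')) = pvCnt cs t := by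
      rw [pvCnt]
      apply List.countP_congr
      intro q hq
      rw [List.mem_range] at hq
      rw [pvF_getD 'y' cs t q hq]
      unfold pvPred
      by_cases hp : pvPar cs.length q
      · rw [if_pos hp]
        have hnp : ¬ (¬ pvPar cs.length q ∧ pvDch cs q = '1') := fun hh => hh.1 hp
        by_cases hq2 : pvC q = t
        · rw [if_neg (by omega : ¬ pvC q < t)]
          simp [hnp]
          intro h _
          rcases h with h | h
          · exact absurd hp.1 h
          · exact absurd hp.2 (by omega)
        · have hb : Nat.testBit (q + 1) t = false := by
            rw [hp.1, Nat.testBit_two_pow]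
            simp [hq2]
          simp [hb]
      · rw [if_neg hp]
        simp [hp, Bool.and_comm]
    rw [hcount]
    by_cases hcnt : pvCnt cs t % 2 = 0
    · rw [if_pos hcnt]
      rw [PySem.List.pySetD_natCast]
      rw [pvF_step 'y' cs t htm '0' (by rw [pvBitc, if_neg (by omega)])]
      refine congrArg₂ _ rfl ?_
      rw [← pow_succ]
    · rw [if_neg hcnt]
      rw [PySem.List.pySetD_natCast]
      rw [pvF_step 'y' cs t htm '1' (by rw [pvBitc, if_pos (by omega)])]
      refine congrArg₂ _ rfl ?_
      rw [← pow_succ]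

/- ---- B side ---- -/

def pvAcc (cs : List Char) (j : Nat) : Nat :=
  (List.range j).foldl (fun a i => if ¬ pvPar cs.length i ∧ pvDch cs i = '1' then a ^^^ (i+1) else a) 0

theorem pvXorFold (l : List Nat) (p : Nat → Prop) [DecidablePred p] (k : Nat) (a : Nat) :
    Nat.testBit (l.foldl (fun acc i => if p i then acc ^^^ (i+1) else acc) a) k
      = ((a.testBit k) ^^ decide ((l.countP (fun i => decide (p i) && Nat.testBit (i+1) k)) % 2 = 1)) := by
  induction l generalizing a with
  | nil => simp
  | cons i t ih =>
    rw [List.foldl_cons, List.countP_cons, ih]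
    set ct := t.countP (fun i => decide (p i) && Nat.testBit (i+1) k) with hct
    by_cases hp : p i
    · rw [if_pos hp]
      by_cases hb : Nat.testBit (i+1) k
      · have hone : (decide (p i) && Nat.testBit (i+1) k) = true := by simp [hp, hb]
        rw [hone, if_pos rfl, Nat.testBit_xor, hb]
        have e : decide ((ct + 1) % 2 = 1) = ! decide (ct % 2 = 1) := by
          by_cases hc : ct % 2 = 1 <;> simp [hc] <;> omega
        rw [e]
        cases (a.testBit k) <;> cases (decide (ct % 2 = 1)) <;> rfl
      · have hone : (decide (p i) && Nat.testBit (i+1) k) = false := by simp [hb]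
        rw [hone, if_neg (by simp), Nat.testBit_xor]
        rw [Bool.eq_false_iff.mpr hb]  -- replace testBit (i+1) k with false
        simp
    · rw [if_neg hp]
      have hone : (decide (p i) && Nat.testBit (i+1) k) = false := by simp [hp]
      rw [hone, if_neg (by simp)]
      simp

theorem pvBloop (checkNum : String) : ∀ j, j ≤ checkNum.toList.length + pvC checkNum.toList.length →
    (List.range j).foldl
        (pvBStep checkNum
          (PySem.Set.ofList ((List.range (pvC checkNum.toList.length)).map (fun k => (1 <<< k) - 1))))
        (([] : List Char), 0, 0) =
      ((List.range j).map (fun i => if pvPar checkNum.toList.length i then '0' else pvDch checkNum.toList i),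
       pvAcc checkNum.toList j,
       j - min (pvC j) (pvC checkNum.toList.length)) := by
  intro j
  induction j with
  | zero => intro _; rfl
  | succ j ih =>
    intro hj
    rw [List.range_succ, List.foldl_append, ih (by omega), List.foldl_cons, List.foldl_nil]
    simp only [pvBStep]
    have hCle := pvC_le_self j
    by_cases hp : pvPar checkNum.toList.length j
    · rw [if_pos ((pvSlots_mem checkNum.toList.length j).mpr hp)]
      have hc1 : pvC (j+1) = pvC j + 1 := by
        have e : pvC (j+1) = if j + 1 = 2 ^ pvC j then pvC j + 1 else pvC j := rfl
        rw [e, if_pos hp.1]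
      have hlt : pvC j < pvC checkNum.toList.length :=
        (pvC_lt_iff checkNum.toList.length (pvC j)).mpr
          (by have h1 := hp.1; have h2 := hp.2; omega)
      refine congrArg₂ _ ?_ (congrArg₂ _ ?_ ?_)
      · rw [List.map_append]
        simp only [List.map_cons, List.map_nil]
        rw [if_pos hp]
      · have hno : ¬ (¬ pvPar checkNum.toList.length j ∧ pvDch checkNum.toList j = '1') :=
          fun hh => hh.1 hp
        rw [pvAcc, pvAcc, List.range_succ, List.foldl_append, List.foldl_cons, List.foldl_nil,
            if_neg hno]
      · rw [hc1]
        omega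
    · rw [if_neg (by
        intro hh
        exact hp ((pvSlots_mem checkNum.toList.length j).mp (by simpa using hh)))]
      have hCj1 : pvC (j+1) = pvC j ∨
          (pvC (j+1) = pvC j + 1 ∧ pvC checkNum.toList.length ≤ pvC j) := by
        have e : pvC (j+1) = if j + 1 = 2 ^ pvC j then pvC j + 1 else pvC j := rfl
        by_cases hq : j + 1 = 2 ^ pvC j
        · right
          refine ⟨by rw [e, if_pos hq], ?_⟩
          by_contra hcon
          have := (pvC_lt_iff checkNum.toList.length (pvC j)).mp (by omega)
          exact hp ⟨hq, by omega⟩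
        · left
          rw [e, if_neg hq]
      have hdi : (j + 1) - min (pvC (j+1)) (pvC checkNum.toList.length)
          = (j - min (pvC j) (pvC checkNum.toList.length)) + 1 := by
        rcases hCj1 with h | ⟨h1, h2⟩
        · rw [h]; omega
        · rw [h1]; omega
      refine congrArg₂ _ ?_ (congrArg₂ _ ?_ ?_)
      · rw [List.map_append]
        simp only [List.map_cons, List.map_nil]
        rw [if_neg hp]
        rfl
      · rw [pvAcc, pvAcc, List.range_succ, List.foldl_append, List.foldl_cons, List.foldl_nil]
        have hc : checkNum.toList.getD (j - min (pvC j) (pvC checkNum.toList.length)) ' '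
            = pvDch checkNum.toList j := rfl
        by_cases h1 : pvDch checkNum.toList j = '1'
        · have hyes : (¬ pvPar checkNum.toList.length j ∧ pvDch checkNum.toList j = '1') := ⟨hp, h1⟩
          rw [hc, if_pos h1, if_pos hyes]
        · have hno : ¬ (¬ pvPar checkNum.toList.length j ∧ pvDch checkNum.toList j = '1') :=
            fun hh => h1 hh.2
          rw [hc, if_neg h1, if_neg hno]
      · exact hdi.symm


theorem pvBfill (cs : List Char) (acc : Nat)
    (hbit : ∀ k, k < pvC cs.length → (Nat.testBit acc k = decide (pvCnt cs k % 2 = 1))) :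
    ∀ t, t ≤ pvC cs.length →
      (List.range t).foldl (pvBFill acc)
          ((List.range (cs.length + pvC cs.length)).map
            (fun i => if pvPar cs.length i then '0' else pvDch cs i))
        = pvF '0' cs t := by
  intro t
  induction t with
  | zero =>
    intro _
    rw [List.range_zero, List.foldl_nil, pvF]
    apply List.map_congr_left
    intro i _
    by_cases hp : pvPar cs.length i <;> simp [hp]
  | succ t ih =>
    intro ht
    rw [List.range_succ, List.foldl_append, ih (by omega), List.foldl_cons, List.foldl_nil]
    rw [pvBFill]
    have htm : t < pvC cs.length := by omega
    have h1 : 1 <<< t = 2 ^ t := by rw [Nat.shiftLeft_eq, one_mul]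
    have hch : (if (acc >>> t) &&& 1 = 1 then '1' else '0') = pvBitc cs t := by
      have e1 : (acc >>> t) &&& 1 = acc / 2 ^ t % 2 := by
        rw [Nat.and_one_is_mod, Nat.shiftRight_eq_div_pow]
      have e2 := hbit t htm
      rw [Nat.testBit_eq_decide_div_mod_eq] at e2
      have hiff : (acc / 2 ^ t % 2 = 1) ↔ (pvCnt cs t % 2 = 1) := decide_eq_decide.mp e2
      rw [e1, pvBitc]
      by_cases hx : acc / 2 ^ t % 2 = 1
      · rw [if_pos hx, if_pos (hiff.mp hx)]
      · rw [if_neg hx, if_neg (fun hh => hx (hiff.mpr hh))]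
    rw [h1, hch]
    exact pvF_step '0' cs t htm _ rfl

/- ---- final assembly ---- -/

theorem pvListToString (l : List Char) : listToString l = String.ofList l := by
  have aux : ∀ (l : List Char) (s : String), (l.foldl (fun a c => a.push c) s).toList = s.toList ++ l := by
    intro l
    induction l with
    | nil => simp
    | cons c t ih => intro s; simp [List.foldl_cons, ih, String.toList_push]
  apply String.toList_inj.mp
  rw [listToString]
  rw [aux]
  simp

-- ===== VERDICT (by name: the statement is the Claim_ definition above) =====
theorem checkEncoding_spec : Claim_equal_checkEncoding := by
  unfold Claim_equal_checkEncoding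
  intro s _
  unfold Spec_checkEncoding
  have hA : checkEncoding s = String.ofList (pvF 'y' s.toList (pvC s.toList.length)) := by
    unfold checkEncoding
    dsimp only
    rw [pvAloop s.toList s.toList.length (le_refl _)]
    dsimp only
    rw [pvMix_eq_F0, pvAloop2 s.toList (pvC s.toList.length) (le_refl _)]
    dsimp only
    rw [pvListToString]
  have hbit : ∀ k, k < pvC s.toList.length →
      Nat.testBit (pvAcc s.toList (s.toList.length + pvC s.toList.length)) k
        = decide (pvCnt s.toList k % 2 = 1) := by
    intro k hk
    rw [pvAcc, pvXorFold _ (fun i => ¬ pvPar s.toList.length i ∧ pvDch s.toList i = '1') k 0]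
    simp only [Nat.zero_testBit, Bool.false_xor]
    congr 1
  have hB : checkEncoding_alt s = String.ofList (pvF '0' s.toList (pvC s.toList.length)) := by
    unfold checkEncoding_alt
    dsimp only
    rw [pvBitLength_eq]
    rw [pvBloop s (s.toList.length + pvC s.toList.length) (le_refl _)]
    dsimp only
    rw [pvBfill s.toList _ hbit (pvC s.toList.length) (le_refl _)]
  rw [hA, hB, pvF_full '0' 'y']
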